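-- pv_equiv track=rewrite | github.com/HAIDEJIANG/bababot-workspace | scripts/rfq_auto/rfq_auto_submit_final.py | select_top_suppliers
-- ===== SOURCE A (Python) =====
-- VALID_CONDITIONS = ["NE", "FN", "NS", "OH", "SV", "AR"]
--
-- CONDITION_PRIORITY = {c: i for i, c in enumerate(VALID_CONDITIONS)}
--
-- def select_top_suppliers(suppliers: list, max_count: int = 10) -> list:
--     """按优先级选择供应商"""
--     # 过滤有效 Condition
--     valid_suppliers = [s for s in suppliers if s.get("condition") in VALID_CONDITIONS]
--
--     # 按优先级排序
--     valid_suppliers.sort(key=lambda s: (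
--         CONDITION_PRIORITY.get(s["condition"], 999),
--         s["vendor"].lower()
--     ))
--
--     # 去重（同一供应商只保留最高优先级）
--     seen_vendors = set()
--     unique_suppliers = []
--     for s in valid_suppliers:
--         vendor_key = s["vendor"].upper()
--         if vendor_key not in seen_vendors:
--             seen_vendors.add(vendor_key)
--             unique_suppliers.append(s)
--
--     return unique_suppliers[:max_count]
-- ===== SOURCE B (Python) =====
-- VALID_CONDITIONS = ["NE", "FN", "NS", "OH", "SV", "AR"]
--
-- CONDITION_PRIORITY = {c: i for i, c in enumerate(VALID_CONDITIONS)}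
--
-- def select_top_suppliers(suppliers: list, max_count: int = 10) -> list:
--     """One pass keeping the best supplier per vendor, then sort the reduced set."""
--     best = {}
--     for s in suppliers:
--         if s.get("condition") not in VALID_CONDITIONS:
--             continue
--         key = s["vendor"].upper()
--         b = best.get(key)
--         if b is None or CONDITION_PRIORITY.get(s["condition"], 999) < CONDITION_PRIORITY.get(b["condition"], 999):
--             best[key] = s
--     ranked = sorted(best.values(), key=lambda s: (
--         CONDITION_PRIORITY.get(s["condition"], 999),
--         s["vendor"].lower()
--     ))
--     return ranked[:max_count]
-- ===== Notes on version B (the rewrite author's own statement) =====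
-- stated objective: alternative
-- what changed: B dedups before sorting: one pass over the input maintains a vendor.upper()->best-supplier dict (replacing the stored entry only on strictly lower CONDITION_PRIORITY, so the earliest entry wins ties), then sorts just the reduced set and slices, instead of A's filter, full stable sort, then seen-set dedup scan; Pre_ excludes only inputs where both Pythons raise KeyError (a valid-condition supplier without a 'vendor' key).
import Mathlib
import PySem

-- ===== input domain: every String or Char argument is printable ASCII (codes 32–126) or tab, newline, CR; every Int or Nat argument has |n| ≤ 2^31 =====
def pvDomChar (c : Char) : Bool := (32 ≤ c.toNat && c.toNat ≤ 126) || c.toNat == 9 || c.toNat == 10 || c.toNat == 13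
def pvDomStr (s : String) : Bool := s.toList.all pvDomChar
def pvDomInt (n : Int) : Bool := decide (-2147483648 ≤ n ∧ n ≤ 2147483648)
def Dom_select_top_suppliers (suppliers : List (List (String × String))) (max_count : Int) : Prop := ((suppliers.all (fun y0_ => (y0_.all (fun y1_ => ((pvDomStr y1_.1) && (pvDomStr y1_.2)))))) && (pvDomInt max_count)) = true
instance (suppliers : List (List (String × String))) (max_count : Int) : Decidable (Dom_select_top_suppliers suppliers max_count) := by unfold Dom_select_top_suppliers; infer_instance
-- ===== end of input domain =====

-- B dedups vendors in one pass with a vendor→best dict (keeping the earliest entry on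
-- priority ties) and sorts only the reduced set, instead of A's sort-everything-then-scan;
-- return values agree on Pre_ (objective: alternative).

abbrev Sup : Type := List (String × String)

-- ===== PORT A =====
def VALID_CONDITIONS : List String := ["NE", "FN", "NS", "OH", "SV", "AR"]

def CONDITION_PRIORITY : PySem.Dict String Int :=
  PySem.Dict.ofList [("NE", 0), ("FN", 1), ("NS", 2), ("OH", 3), ("SV", 4), ("AR", 5)]

-- s.get(k) on the association-list dict (first match)
def sGet (s : Sup) (k : String) : Option String := (PySem.Dict.mk s).get? k
-- s[k]; used only where Pre_ guarantees the key is present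
def sItem (s : Sup) (k : String) : String := (sGet s k).getD ""
-- s.get("condition") in VALID_CONDITIONS
def validB (s : Sup) : Bool :=
  match sGet s "condition" with
  | some c => VALID_CONDITIONS.contains c
  | none => false
-- CONDITION_PRIORITY.get(s["condition"], 999)
def prio (s : Sup) : Int := (CONDITION_PRIORITY.get? (sItem s "condition")).getD 999
-- s["vendor"].lower() / s["vendor"].upper()
def lowV (s : Sup) : String := PySem.Str.lower (sItem s "vendor")
def upV (s : Sup) : String := PySem.Str.upper (sItem s "vendor")

def select_top_suppliers (suppliers : List (List (String × String))) (max_count : Int) : List (List (String × String)) :=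
  let valid_suppliers := suppliers.filter validB
  let sorted_suppliers := PySem.List.sorted2 valid_suppliers prio lowV
  let dedup := sorted_suppliers.foldl
    (fun st s =>
      if PySem.Set.contains st.1 (upV s) then st
      else (PySem.Set.add st.1 (upV s), st.2 ++ [s]))
    ((PySem.Set.empty : PySem.Set String), ([] : List Sup))
  PySem.List.slice dedup.2 none (some max_count)

-- ===== PORT B =====
def select_top_suppliers_alt (suppliers : List (List (String × String))) (max_count : Int) : List (List (String × String)) :=
  let best := suppliers.foldl
    (fun d s =>
      if validB s then
        match d.get? (upV s) with
        | none => d.insert (upV s) s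
        | some b => if prio s < prio b then d.insert (upV s) s else d
      else d)
    (PySem.Dict.empty : PySem.Dict String Sup)
  let ranked := PySem.List.sorted2 best.values prio lowV
  PySem.List.slice ranked none (some max_count)

-- ===== PRECONDITION & SPEC =====
-- Pre_ excludes exactly the inputs where the Python raises KeyError: a supplier whose
-- condition is valid but that has no "vendor" key.
def Pre_select_top_suppliers (suppliers : List (List (String × String))) (max_count : Int) : Prop :=
  ∀ s ∈ suppliers, validB s = true → (sGet s "vendor").isSome = true
instance (suppliers : List (List (String × String))) (max_count : Int) : Decidable (Pre_select_top_suppliers suppliers max_count) := by unfold Pre_select_top_suppliers; infer_instance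

def pvWitness_select_top_suppliers : (List (List (String × String))) × Int :=
  ([[("condition", "NE"), ("vendor", "Acme")], [("condition", "FN"), ("vendor", "ACME")]], 2)

def Spec_select_top_suppliers (suppliers : List (List (String × String))) (max_count : Int) (out : List (List (String × String))) : Prop := out = select_top_suppliers_alt suppliers max_count
instance (suppliers : List (List (String × String))) (max_count : Int) (out : List (List (String × String))) : Decidable (Spec_select_top_suppliers suppliers max_count out) := by unfold Spec_select_top_suppliers; infer_instance

-- ===== CLAIM (what is proved, stated in full; the proofs are below) =====
def Claim_equal_select_top_suppliers : Prop := ∀ (suppliers : List (List (String × String))) (max_count : Int), Dom_select_top_suppliers suppliers max_count → Pre_select_top_suppliers suppliers max_count → Spec_select_top_suppliers suppliers max_count (select_top_suppliers suppliers max_count)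

-- ===== LEMMAS AND PROOFS =====

-- the (priority, vendor.lower()) sort key, as a single lexicographic key
def skey (s : Sup) : Lex (Int × String) := toLex (prio s, lowV s)

-- B's per-supplier dict update (the body of B's loop, without the validity guard)
def bstep (d : PySem.Dict String Sup) (s : Sup) : PySem.Dict String Sup :=
  match d.get? (upV s) with
  | none => d.insert (upV s) s
  | some b => if prio s < prio b then d.insert (upV s) s else d

-- A's dedup scan, with the seen-set abstracted to a plain list of keys
def dfk : List Sup → List String → List Sup
  | [], _ => []
  | s :: r, seen => if upV s ∈ seen then dfk r seen else s :: dfk r (upV s :: seen)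


theorem char_val_toNat (c : Char) : c.val.toNat = c.toNat := rfl

-- ASCII-free case algebra: lower ∘ upper = lower and upper ∘ lower = upper on chars
theorem lowChar_upChar (c : Char) :
    PySem.Chars.lowerChar (PySem.Chars.upperChar c) = PySem.Chars.lowerChar c := by
  simp only [PySem.Chars.lowerChar, PySem.Chars.upperChar, PySem.Chars.islower, PySem.Chars.isupper,
    Bool.and_eq_true, decide_eq_true_eq, Char.le_def, UInt32.le_iff_toNat_le, char_val_toNat,
    show ('a').val.toNat = 97 from rfl, show ('z').val.toNat = 122 from rfl,
    show ('A').val.toNat = 65 from rfl, show ('Z').val.toNat = 90 from rfl]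
  by_cases hl : 97 ≤ c.toNat ∧ c.toNat ≤ 122
  · have ht : (Char.ofNat (c.toNat - 32)).toNat = c.toNat - 32 := by
      rw [Char.toNat_ofNat, if_pos (by unfold Nat.isValidChar; left; omega)]
    rw [if_pos hl, if_pos (by omega : 65 ≤ (Char.ofNat (c.toNat - 32)).toNat ∧ (Char.ofNat (c.toNat - 32)).toNat ≤ 90),
      if_neg (by omega : ¬(65 ≤ c.toNat ∧ c.toNat ≤ 90)), ht,
      (by omega : c.toNat - 32 + 32 = c.toNat), Char.ofNat_toNat]
  · rw [if_neg hl]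

theorem upChar_lowChar (c : Char) :
    PySem.Chars.upperChar (PySem.Chars.lowerChar c) = PySem.Chars.upperChar c := by
  simp only [PySem.Chars.lowerChar, PySem.Chars.upperChar, PySem.Chars.islower, PySem.Chars.isupper,
    Bool.and_eq_true, decide_eq_true_eq, Char.le_def, UInt32.le_iff_toNat_le, char_val_toNat,
    show ('a').val.toNat = 97 from rfl, show ('z').val.toNat = 122 from rfl,
    show ('A').val.toNat = 65 from rfl, show ('Z').val.toNat = 90 from rfl]
  by_cases hl : 65 ≤ c.toNat ∧ c.toNat ≤ 90
  · have ht : (Char.ofNat (c.toNat + 32)).toNat = c.toNat + 32 := by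
      rw [Char.toNat_ofNat, if_pos (by unfold Nat.isValidChar; left; omega)]
    rw [if_pos hl, if_pos (by omega : 97 ≤ (Char.ofNat (c.toNat + 32)).toNat ∧ (Char.ofNat (c.toNat + 32)).toNat ≤ 122),
      if_neg (by omega : ¬(97 ≤ c.toNat ∧ c.toNat ≤ 122)), ht,
      (by omega : c.toNat + 32 - 32 = c.toNat), Char.ofNat_toNat]
  · rw [if_neg hl]

theorem upper_eq_iff_lower_eq (s t : String) :
    PySem.Str.upper s = PySem.Str.upper t ↔ PySem.Str.lower s = PySem.Str.lower t := by
  constructor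
  · intro h
    have h' := congrArg String.toList h
    rw [PySem.Str.toList_upper, PySem.Str.toList_upper] at h'
    have h2 := congrArg (List.map PySem.Chars.lowerChar) h'
    simp only [PySem.Chars.upper, List.map_map, Function.comp_def, lowChar_upChar] at h2
    apply String.toList_inj.mp
    rw [PySem.Str.toList_lower, PySem.Str.toList_lower]
    simpa [PySem.Chars.lower] using h2
  · intro h
    have h' := congrArg String.toList h
    rw [PySem.Str.toList_lower, PySem.Str.toList_lower] at h'
    have h2 := congrArg (List.map PySem.Chars.upperChar) h'
    simp only [PySem.Chars.lower, List.map_map, Function.comp_def, upChar_lowChar] at h2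
    apply String.toList_inj.mp
    rw [PySem.Str.toList_upper, PySem.Str.toList_upper]
    simpa [PySem.Chars.upper] using h2

theorem lowV_of_upV {a b : Sup} (h : upV a = upV b) : lowV a = lowV b :=
  (upper_eq_iff_lower_eq _ _).1 h
theorem upV_of_lowV {a b : Sup} (h : lowV a = lowV b) : upV a = upV b :=
  (upper_eq_iff_lower_eq _ _).2 h


theorem skey_lt_iff {a b : Sup} (h : lowV a = lowV b) : skey a < skey b ↔ prio a < prio b := by
  simp [skey, Prod.Lex.lt_iff, h]
theorem skey_le_iff {a b : Sup} (h : lowV a = lowV b) : skey a ≤ skey b ↔ prio a ≤ prio b := by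
  simp [skey, Prod.Lex.le_iff, h]
  omega
theorem lowV_of_skey {a b : Sup} (h : skey a = skey b) : lowV a = lowV b := by
  have := (toLex_inj (a := (prio a, lowV a)) (b := (prio b, lowV b))).mp h
  exact congrArg Prod.snd this

theorem skey_lt_iff' (a b : Sup) :
    skey a < skey b ↔ (prio a < prio b ∨ (prio a = prio b ∧ lowV a < lowV b)) := by
  simp [skey, Prod.Lex.lt_iff]

theorem sorted2_eq_sorted (xs : List Sup) :
    PySem.List.sorted2 xs prio lowV = PySem.List.sorted xs skey := by
  simp only [PySem.List.sorted2, PySem.List.sorted, if_neg (by decide : ¬(false = true))]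
  congr 1
  funext acc x
  congr 1
  funext a b
  rcases lt_trichotomy (prio a) (prio b) with h | h | h
  · have hk : skey a < skey b := (skey_lt_iff' a b).mpr (Or.inl h)
    simp [h, hk]
  · have hk : skey a < skey b ↔ lowV a < lowV b := by
      rw [skey_lt_iff']
      constructor
      · rintro (hc | ⟨_, hl⟩)
        · exact absurd hc (by omega)
        · exact hl
      · exact fun hl => Or.inr ⟨h, hl⟩
    simp [hk, (show ¬ prio a < prio b from by omega), (show ¬ prio b < prio a from by omega)]
  · have hk : ¬ (skey a < skey b) := by
      rw [skey_lt_iff']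
      rintro (hc | ⟨hc, _⟩) <;> omega
    simp [hk, h, (show ¬ prio a < prio b from by omega)]

theorem sorted_snoc (xs : List Sup) (x : Sup) :
    PySem.List.sorted (xs ++ [x]) skey
      = PySem.List.insertBy (fun a b => decide (skey a < skey b)) x (PySem.List.sorted xs skey) := by
  simp [PySem.List.sorted, List.foldl_append]

theorem insert_split (x : Sup) :
    ∀ M : List Sup, List.Pairwise (fun a b => skey a ≤ skey b) M →
    ∃ T D, PySem.List.insertBy (fun a b => decide (skey a < skey b)) x M = T ++ x :: D ∧
      M = T ++ D ∧ (∀ y ∈ T, skey y ≤ skey x) ∧ (∀ y ∈ D, skey x < skey y)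
  | [], _ => ⟨[], [], by simp [PySem.List.insertBy]⟩
  | y :: ys, hp => by
    by_cases h : skey x < skey y
    · refine ⟨[], y :: ys, ?_, rfl, by simp, ?_⟩
      · simp [PySem.List.insertBy, h]
      · intro z hz
        rcases List.mem_cons.mp hz with rfl | hz
        · exact h
        · exact lt_of_lt_of_le h (List.rel_of_pairwise_cons hp hz)
    · obtain ⟨T, D, h1, h2, h3, h4⟩ := insert_split x ys hp.of_cons
      refine ⟨y :: T, D, ?_, by simp [h2], ?_, h4⟩
      · simp [PySem.List.insertBy, h, h1]
      · intro z hz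
        rcases List.mem_cons.mp hz with rfl | hz
        · exact not_lt.mp h
        · exact h3 z hz

-- dfk toolkit

theorem dfk_congr : ∀ (M : List Sup) (s₁ s₂ : List String), (∀ k, k ∈ s₁ ↔ k ∈ s₂) →
    dfk M s₁ = dfk M s₂
  | [], _, _, _ => rfl
  | s :: r, s₁, s₂, h => by
    by_cases hm : upV s ∈ s₁
    · rw [dfk, dfk, if_pos hm, if_pos ((h _).mp hm)]
      exact dfk_congr r s₁ s₂ h
    · rw [dfk, dfk, if_neg hm, if_neg (fun hc => hm ((h _).mpr hc))]
      refine congrArg _ (dfk_congr r _ _ fun k => ?_)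
      simp only [List.mem_cons]
      exact or_congr Iff.rfl (h k)

theorem dfk_append (A : List Sup) : ∀ (B : List Sup) (seen : List String),
    dfk (A ++ B) seen = dfk A seen ++ dfk B (A.map upV ++ seen) := by
  induction A with
  | nil => intro B seen; simp [dfk]
  | cons a r ih =>
    intro B seen
    by_cases hm : upV a ∈ seen
    · rw [List.cons_append, dfk, if_pos hm, dfk, if_pos hm, ih]
      refine congrArg _ (dfk_congr B _ _ fun k => ?_)
      simp only [List.map_cons, List.cons_append, List.mem_cons, List.mem_append]
      constructor
      · rintro (h | h) <;> tauto
      · rintro (h | h | h)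
        · subst h; tauto
        · tauto
        · tauto
    · rw [List.cons_append, dfk, if_neg hm, dfk, if_neg hm, ih, List.cons_append]
      refine congrArg _ (congrArg _ (dfk_congr B _ _ fun k => ?_))
      simp only [List.map_cons, List.cons_append, List.mem_cons, List.mem_append]
      tauto

theorem dfk_not_seen : ∀ (M : List Sup) (seen : List String) (y : Sup),
    y ∈ dfk M seen → upV y ∉ seen
  | [], _, _, h => absurd h (by simp [dfk])
  | s :: r, seen, y, h => by
    rw [dfk] at h
    split at h
    · exact dfk_not_seen r seen y h
    · rcases List.mem_cons.mp h with rfl | h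
      · assumption
      · exact fun hc => dfk_not_seen r _ y h (List.mem_cons_of_mem _ hc)

theorem dfk_sublist : ∀ (M : List Sup) (seen : List String), (dfk M seen).Sublist M
  | [], _ => by simp [dfk]
  | s :: r, seen => by
    rw [dfk]
    split
    · exact (dfk_sublist r seen).cons _
    · exact (dfk_sublist r _).cons₂ _

theorem dfk_mem {M : List Sup} {seen : List String} {y : Sup} (h : y ∈ dfk M seen) : y ∈ M :=
  (dfk_sublist M seen).mem h

theorem dfk_seen_cons : ∀ (M : List Sup) (k : String) (seen : List String),
    dfk M (k :: seen) = (dfk M seen).filter (fun y => !(upV y == k))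
  | [], _, _ => rfl
  | s :: r, k, seen => by
    by_cases he : upV s = k
    · subst he
      rw [dfk, if_pos (List.mem_cons_self), dfk]
      by_cases hm : upV s ∈ seen
      · rw [if_pos hm]; exact dfk_seen_cons r _ seen
      · rw [if_neg hm, List.filter_cons_of_neg (by simp)]
        exact (List.filter_eq_self.mpr (fun y hy => by
          have := dfk_not_seen r _ y hy
          simp only [List.mem_cons, not_or] at this
          simpa using this.1)).symm
    · rw [dfk, dfk]
      by_cases hm : upV s ∈ seen
      · rw [if_pos (List.mem_cons_of_mem _ hm), if_pos hm]
        exact dfk_seen_cons r k seen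
      · rw [if_neg (by simp [he, hm]), if_neg hm,
          List.filter_cons_of_pos (by simpa using he)]
        rw [show (upV s :: k :: seen) = _ from rfl]
        rw [dfk_congr r (upV s :: k :: seen) (k :: upV s :: seen) (fun x => by simp; tauto)]
        rw [dfk_seen_cons r k (upV s :: seen)]

theorem dfk_filter_key : ∀ (M : List Sup) (seen : List String) (k : String), k ∉ seen →
    (dfk M seen).filter (fun y => upV y == k) = (M.filter (fun y => upV y == k)).take 1
  | [], _, _, _ => rfl
  | s :: r, seen, k, hk => by
    by_cases hm : upV s ∈ seen
    · have hne : ¬ (upV s == k) = true := by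
        simp only [beq_iff_eq]
        rintro rfl; exact hk hm
      rw [dfk, if_pos hm, List.filter_cons_of_neg (by simpa using hne), dfk_filter_key r seen k hk]
    · rw [dfk, if_neg hm]
      by_cases he : upV s = k
      · subst he
        rw [List.filter_cons_of_pos (by simp), List.filter_cons_of_pos (by simp)]
        rw [List.take_succ_cons, List.take_zero]
        rw [List.filter_eq_nil_iff.mpr]
        intro y hy
        have := dfk_not_seen r _ y hy
        simp only [List.mem_cons, not_or] at this
        simp only [beq_iff_eq]
        exact fun hc => this.1 hc
      · rw [List.filter_cons_of_neg (by simpa using he), List.filter_cons_of_neg (by simpa using he),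
          dfk_filter_key r _ k (by simp only [List.mem_cons, not_or]; exact ⟨fun hc => he hc.symm, hk⟩)]


theorem dfk_pairwise_ne : ∀ (M : List Sup) (seen : List String),
    List.Pairwise (fun a b => upV a ≠ upV b) (dfk M seen)
  | [], _ => by simp [dfk]
  | s :: r, seen => by
    rw [dfk]
    split
    · exact dfk_pairwise_ne r seen
    · refine List.Pairwise.cons (fun y hy => ?_) (dfk_pairwise_ne r _)
      have := dfk_not_seen r _ y hy
      simp only [List.mem_cons, not_or] at this
      exact fun hc => this.1 hc.symm

theorem filter_singleton_erase {p : Sup → Bool} : ∀ (L : List Sup) (t : Sup),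
    L.filter p = [t] → L.filter (fun y => !(p y)) = L.erase t
  | [], t, h => by simp at h
  | a :: r, t, h => by
    by_cases hp : p a
    · rw [List.filter_cons_of_pos hp] at h
      have ha : a = t := (List.cons_eq_cons.mp h).1
      have hr : r.filter p = [] := (List.cons_eq_cons.mp h).2
      subst ha
      rw [List.filter_cons_of_neg (by simp [hp]), List.erase_cons_head]
      exact List.filter_eq_self.mpr fun y hy => by
        simp only [Bool.not_eq_eq_eq_not, Bool.not_true]
        simpa using List.filter_eq_nil_iff.mp hr y hy
    · rw [List.filter_cons_of_neg hp] at h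
      have hat : a ≠ t := by
        intro he
        have ht : t ∈ r.filter p := by rw [h]; exact List.mem_cons_self
        rw [he] at hp
        exact hp (List.mem_filter.mp ht).2
      rw [List.filter_cons_of_pos (by simpa using hp), List.erase_cons_tail (by simpa using hat)]
      exact congrArg _ (filter_singleton_erase r t h)

theorem foldA : ∀ (M : List Sup) (se : PySem.Set String) (out : List Sup) (seen : List String),
    (∀ k, k ∈ se ↔ k ∈ seen) →
    (M.foldl
      (fun st s =>
        if PySem.Set.contains st.1 (upV s) then st
        else (PySem.Set.add st.1 (upV s), st.2 ++ [s]))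
      (se, out)).2 = out ++ dfk M seen
  | [], se, out, seen, h => by simp [dfk]
  | s :: r, se, out, seen, h => by
    rw [List.foldl_cons, dfk]
    by_cases hm : upV s ∈ seen
    · rw [if_pos (by simpa [PySem.Set.contains, List.contains_iff_mem] using (h _).mpr hm),
        if_pos hm]
      exact foldA r se out seen h
    · rw [if_neg (by simpa [PySem.Set.contains, List.contains_iff_mem] using fun hc => hm ((h _).mp hc)),
        if_neg hm]
      rw [foldA r _ _ (upV s :: seen) (fun k => by
        simp only [PySem.Set.mem_add, List.mem_cons, h k]
        tauto)]
      simp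

-- the main invariant of B's dict fold, by induction from the right
theorem bmain (f : List Sup) :
    ((f.foldl bstep PySem.Dict.empty).keys.Nodup) ∧
    (∀ p ∈ (f.foldl bstep PySem.Dict.empty).items, upV p.2 = p.1) ∧
    (∀ k, (f.foldl bstep PySem.Dict.empty).get? k
        = ((PySem.List.sorted f skey).filter (fun y => upV y == k)).head?) ∧
    ((f.foldl bstep PySem.Dict.empty).values.Perm (dfk (PySem.List.sorted f skey) [])) := by
  induction f using List.reverseRecOn with
  | nil =>
    refine ⟨by simp [PySem.Dict.empty], by simp [PySem.Dict.empty], ?_, by simp [PySem.Dict.empty, PySem.Dict.values, PySem.List.sorted, dfk]⟩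
    intro k
    simp [PySem.Dict.empty, PySem.Dict.get?, PySem.List.sorted]
  | append_singleton f s ih =>
    obtain ⟨hnd, hkv, hinv, hperm⟩ := ih
    have hMp : List.Pairwise (fun a b => skey a ≤ skey b) (PySem.List.sorted f skey) :=
      PySem.List.sorted_pairwise f skey
    obtain ⟨T, D, hIns, hMTD, hT, hD⟩ := insert_split s (PySem.List.sorted f skey) hMp
    have hfold : (f ++ [s]).foldl bstep PySem.Dict.empty = bstep (f.foldl bstep PySem.Dict.empty) s := by
      rw [List.foldl_append]; rfl
    have hsort : PySem.List.sorted (f ++ [s]) skey = T ++ s :: D := by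
      rw [sorted_snoc, hIns]
    have hTM : ∀ y ∈ T, y ∈ PySem.List.sorted f skey := by
      intro y hy; rw [hMTD]; exact List.mem_append_left _ hy
    have hDM : ∀ y ∈ D, y ∈ PySem.List.sorted f skey := by
      intro y hy; rw [hMTD]; exact List.mem_append_right _ hy
    rw [hfold, hsort]
    cases hq : (f.foldl bstep PySem.Dict.empty).get? (upV s) with
    | none =>
      -- fresh vendor key
      have h0 := hq
      have hfilnil : (PySem.List.sorted f skey).filter (fun y => upV y == upV s) = [] := by
        have h := (hinv (upV s)).symm.trans h0
        rwa [List.head?_eq_none_iff] at h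
      have nogroup : ∀ y ∈ PySem.List.sorted f skey, ¬ (upV y = upV s) := by
        intro y hy hc
        have := List.filter_eq_nil_iff.mp hfilnil y hy
        simp [hc] at this
      have hcont : (f.foldl bstep PySem.Dict.empty).contains (upV s) = false := by
        rw [PySem.Dict.contains_eq_isSome_get?, h0]; rfl
      have hstep : bstep (f.foldl bstep PySem.Dict.empty) s
          = (f.foldl bstep PySem.Dict.empty).insert (upV s) s := by
        simp only [bstep, h0]
      have hitems := PySem.Dict.items_insert_of_not_contains (f.foldl bstep PySem.Dict.empty) (k := upV s) s hcont
      rw [hstep]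
      refine ⟨PySem.Dict.nodup_keys_insert _ _ _ hnd, ?_, ?_, ?_⟩
      · intro p hp
        rw [hitems] at hp
        rcases List.mem_append.mp hp with hp | hp
        · exact hkv p hp
        · simp only [List.mem_singleton] at hp; subst hp; rfl
      · intro k'
        rw [PySem.Dict.get?_insert]
        by_cases hk' : k' = upV s
        · subst hk'
          rw [if_pos rfl, List.filter_append, List.filter_cons_of_pos (by simp),
            List.filter_eq_nil_iff.mpr (fun y hy => by simpa using nogroup y (hTM y hy))]
          rfl
        · rw [if_neg hk', hinv k', hMTD, List.filter_append, List.filter_append,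
            List.filter_cons_of_neg (by simpa using fun hc => hk' hc.symm)]
      · have hvals : ((f.foldl bstep PySem.Dict.empty).insert (upV s) s).values
            = (f.foldl bstep PySem.Dict.empty).values ++ [s] := by
          simp only [PySem.Dict.values, hitems, List.map_append]; rfl
        have hks : upV s ∉ T.map upV ++ ([] : List String) := by
          simp only [List.append_nil, List.mem_map]
          rintro ⟨y, hy, hc⟩
          exact nogroup y (hTM y hy) hc
        have hdfk : dfk (T ++ s :: D) [] = dfk T [] ++ s :: dfk D (T.map upV ++ []) := by
          rw [dfk_append, dfk, if_neg hks]
          rw [dfk_seen_cons, List.filter_eq_self.mpr]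
          intro y hy
          simp only [Bool.not_eq_eq_eq_not, Bool.not_true, beq_eq_false_iff_ne, ne_eq]
          exact nogroup y (hDM y (dfk_mem hy))
        rw [hvals, hdfk]
        have h2 : dfk T [] ++ dfk D (T.map upV ++ []) = dfk (PySem.List.sorted f skey) [] := by
          rw [← dfk_append, ← hMTD]
        refine List.Perm.trans ?_ List.perm_middle.symm
        rw [h2]
        exact (List.perm_append_singleton _ _).trans (hperm.cons s)
    | some t =>
      -- vendor key already present, with current best t = head of its sorted group
      have hhead : ((PySem.List.sorted f skey).filter (fun y => upV y == upV s)).head? = some t :=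
        (hinv (upV s)).symm.trans hq
      obtain ⟨rest, hfl⟩ : ∃ rest, (PySem.List.sorted f skey).filter (fun y => upV y == upV s) = t :: rest := by
        cases hfl : (PySem.List.sorted f skey).filter (fun y => upV y == upV s) with
        | nil => rw [hfl] at hhead; simp at hhead
        | cons a r => rw [hfl] at hhead; simp only [List.head?_cons, Option.some_inj] at hhead; exact ⟨r, by rw [hhead]⟩
      have htmem : t ∈ (PySem.List.sorted f skey).filter (fun y => upV y == upV s) := by
        rw [hfl]; exact List.mem_cons_self
      have htM : t ∈ PySem.List.sorted f skey := (List.mem_filter.mp htmem).1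
      have htK : upV t = upV s := by simpa using (List.mem_filter.mp htmem).2
      have tmin : ∀ y ∈ PySem.List.sorted f skey, upV y = upV s → skey t ≤ skey y := by
        intro y hy hc
        have hyf : y ∈ (PySem.List.sorted f skey).filter (fun y => upV y == upV s) :=
          List.mem_filter.mpr ⟨hy, by simpa using hc⟩
        rw [hfl] at hyf
        rcases List.mem_cons.mp hyf with rfl | hyf
        · exact le_refl _
        · have hpw := hMp.filter (fun y => upV y == upV s)
          rw [hfl] at hpw
          exact List.rel_of_pairwise_cons hpw hyf
      have hlow : lowV t = lowV s := lowV_of_upV htK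
      have hcont : (f.foldl bstep PySem.Dict.empty).contains (upV s) = true := by
        rw [PySem.Dict.contains_eq_isSome_get?, hq]; rfl
      by_cases h2 : prio s < prio t
      · -- replace: s strictly better than the stored best
        have hks : skey s < skey t := (skey_lt_iff hlow.symm).mpr h2
        have groupT : ∀ y ∈ T, upV y ≠ upV s := by
          intro y hyT hc
          exact absurd (lt_of_le_of_lt (le_trans (tmin y (hTM y hyT) hc) (hT y hyT)) hks) (lt_irrefl _)
        have hstep : bstep (f.foldl bstep PySem.Dict.empty) s
            = (f.foldl bstep PySem.Dict.empty).insert (upV s) s := by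
          simp only [bstep, hq, if_pos h2]
        have hfilT : T.filter (fun y => upV y == upV s) = [] :=
          List.filter_eq_nil_iff.mpr (fun y hy => by simpa using groupT y hy)
        have hfilD : D.filter (fun y => upV y == upV s) = t :: rest := by
          have := hfl
          rw [hMTD, List.filter_append, hfilT, List.nil_append] at this
          exact this
        rw [hstep]
        have hitems := PySem.Dict.items_insert_of_contains (f.foldl bstep PySem.Dict.empty) (k := upV s) s hcont
        refine ⟨?_, ?_, ?_, ?_⟩
        · rw [PySem.Dict.keys_insert_of_contains _ _ hcont]; exact hnd
        · intro p hp
          rcases (PySem.Dict.mem_items_insert _ _ _ _).mp hp with rfl | ⟨hp, _⟩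
          · rfl
          · exact hkv p hp
        · intro k'
          rw [PySem.Dict.get?_insert]
          by_cases hk' : k' = upV s
          · subst hk'
            rw [if_pos rfl, List.filter_append, List.filter_cons_of_pos (by simp), hfilT]
            rfl
          · rw [if_neg hk', hinv k', hMTD, List.filter_append, List.filter_append,
              List.filter_cons_of_neg (by simpa using fun hc => hk' hc.symm)]
        · -- permutation: old best t swapped for s on both sides
          obtain ⟨L₁, L₂, hdec⟩ := List.append_of_mem (PySem.Dict.mem_items_of_get?_eq_some _ hq)
          have hkeys : (f.foldl bstep PySem.Dict.empty).keys
              = L₁.map Prod.fst ++ upV s :: L₂.map Prod.fst := by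
            simp only [PySem.Dict.keys, hdec, List.map_append, List.map_cons]
          have hnots : upV s ∉ L₁.map Prod.fst ∧ upV s ∉ L₂.map Prod.fst := by
            rw [hkeys] at hnd
            simp only [List.nodup_append, List.nodup_cons] at hnd
            exact ⟨fun hc => hnd.2.2 (upV s) hc (upV s) (by simp) rfl, hnd.2.1.1⟩
          have hfix : ∀ (L : List (String × Sup)), upV s ∉ L.map Prod.fst →
              L.map (fun p => if (p.1 == upV s) = true then (upV s, s) else p) = L := by
            intro L hL
            refine (List.map_congr_left (g := id) (fun p hp => ?_)).trans (List.map_id _)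
            simp only [id]
            rw [if_neg (by simpa using fun hc : p.1 = upV s => hL (hc ▸ List.mem_map_of_mem hp))]
          have hmap : ((f.foldl bstep PySem.Dict.empty).insert (upV s) s).items
              = L₁ ++ (upV s, s) :: L₂ := by
            rw [hitems, hdec, List.map_append, List.map_cons, hfix L₁ hnots.1, hfix L₂ hnots.2]
            simp
          have hvals' : ((f.foldl bstep PySem.Dict.empty).insert (upV s) s).values
              = L₁.map Prod.snd ++ s :: L₂.map Prod.snd := by
            simp only [PySem.Dict.values, hmap, List.map_append, List.map_cons]
          have hvals : (f.foldl bstep PySem.Dict.empty).values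
              = L₁.map Prod.snd ++ t :: L₂.map Prod.snd := by
            simp only [PySem.Dict.values, hdec, List.map_append, List.map_cons]
          have htnotL1 : t ∉ L₁.map Prod.snd := by
            rintro hmem
            obtain ⟨p, hp, hp2⟩ := List.mem_map.mp hmem
            have := hkv p (by rw [hdec]; exact List.mem_append_left _ hp)
            rw [hp2, htK] at this
            exact hnots.1 (this ▸ List.mem_map_of_mem hp)
          have herase : (f.foldl bstep PySem.Dict.empty).values.erase t
              = L₁.map Prod.snd ++ L₂.map Prod.snd := by
            rw [hvals, List.erase_append_right _ htnotL1, List.erase_cons_head]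
          -- dfk side
          have hks2 : upV s ∉ T.map upV ++ ([] : List String) := by
            simp only [List.append_nil, List.mem_map]
            rintro ⟨y, hy, hc⟩
            exact groupT y hy hc
          have hDfil : (dfk D (T.map upV ++ [])).filter (fun y => upV y == upV s) = [t] := by
            rw [dfk_filter_key D _ _ hks2, hfilD, List.take_succ_cons, List.take_zero]
          have hdfk : dfk (T ++ s :: D) []
              = dfk T [] ++ s :: (dfk D (T.map upV ++ [])).erase t := by
            rw [dfk_append, dfk, if_neg hks2, dfk_seen_cons,
              filter_singleton_erase _ t hDfil]
          have htnotT : t ∉ dfk T [] := fun hc => groupT t (dfk_mem hc) htK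
          have h3 : dfk T [] ++ (dfk D (T.map upV ++ [])).erase t
              = (dfk (PySem.List.sorted f skey) []).erase t := by
            rw [← List.erase_append_right _ htnotT, ← dfk_append, ← hMTD]
          rw [hvals', hdfk]
          refine List.Perm.trans ?_ List.perm_middle.symm
          refine List.Perm.trans List.perm_middle ?_
          refine List.Perm.cons s ?_
          rw [h3, ← herase]
          exact hperm.erase t
      · -- keep: stored best at least as good
        have hts : skey t ≤ skey s := (skey_le_iff hlow).mpr (not_lt.mp h2)
        have hstep : bstep (f.foldl bstep PySem.Dict.empty) s = f.foldl bstep PySem.Dict.empty := by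
          simp only [bstep, hq, if_neg h2]
        have htT : t ∈ T := by
          have := htM
          rw [hMTD] at this
          rcases List.mem_append.mp this with h | h
          · exact h
          · exact absurd (hD t h) (not_lt.mpr hts)
        rw [hstep]
        refine ⟨hnd, hkv, ?_, ?_⟩
        · intro k'
          by_cases hk' : k' = upV s
          · subst hk'
            rw [hq, List.filter_append, List.filter_cons_of_pos (by simp)]
            have htTf : t ∈ T.filter (fun y => upV y == upV s) :=
              List.mem_filter.mpr ⟨htT, by simpa using htK⟩
            cases hTf : T.filter (fun y => upV y == upV s) with
            | nil => rw [hTf] at htTf; simp at htTf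
            | cons a l =>
              have : a = t := by
                have h4 := hfl
                rw [hMTD, List.filter_append, hTf] at h4
                simpa using (List.cons_eq_cons.mp h4).1
              rw [this]
              rfl
          · rw [hinv k', hMTD, List.filter_append, List.filter_append,
              List.filter_cons_of_neg (by simpa using fun hc => hk' hc.symm)]
        · have hseen : upV s ∈ T.map upV ++ ([] : List String) := by
            simp only [List.append_nil, List.mem_map]
            exact ⟨t, htT, htK⟩
          have hdfk : dfk (T ++ s :: D) [] = dfk (PySem.List.sorted f skey) [] := by
            rw [dfk_append, dfk, if_pos hseen, ← dfk_append, ← hMTD]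
          rw [hdfk]
          exact hperm

theorem core (f : List Sup) :
    ((PySem.List.sorted2 f prio lowV).foldl
        (fun st s =>
          if PySem.Set.contains st.1 (upV s) then st
          else (PySem.Set.add st.1 (upV s), st.2 ++ [s]))
        ((PySem.Set.empty : PySem.Set String), ([] : List Sup))).2
      = PySem.List.sorted2 (f.foldl bstep PySem.Dict.empty).values prio lowV := by
  obtain ⟨hnd, hkv, hinv, hperm⟩ := bmain f
  rw [sorted2_eq_sorted, sorted2_eq_sorted,
    foldA _ _ _ [] (fun k => by simp [PySem.Set.empty]), List.nil_append]
  refine (PySem.List.sorted_eq_of_perm_of_pairwise_lt _ _ skey hperm.symm ?_).symm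
  have hle : List.Pairwise (fun a b => skey a ≤ skey b) (dfk (PySem.List.sorted f skey) []) :=
    List.Pairwise.sublist (dfk_sublist _ _) (PySem.List.sorted_pairwise f skey)
  exact (hle.and (dfk_pairwise_ne _ _)).imp
    (fun h => lt_of_le_of_ne h.1 (fun hc => h.2 (upV_of_lowV (lowV_of_skey hc))))

theorem ports_eq (suppliers : List (List (String × String))) (max_count : Int) :
    select_top_suppliers suppliers max_count = select_top_suppliers_alt suppliers max_count := by
  have hguard : (List.foldl
      (fun (d : PySem.Dict String Sup) s =>
        if validB s then
          match d.get? (upV s) with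
          | none => d.insert (upV s) s
          | some b => if prio s < prio b then d.insert (upV s) s else d
        else d)
      (PySem.Dict.empty : PySem.Dict String Sup) suppliers)
      = (suppliers.filter validB).foldl bstep PySem.Dict.empty := by
    rw [← PySem.List.foldl_if_eq_foldl_filter validB bstep suppliers PySem.Dict.empty]
    rfl
  simp only [select_top_suppliers, select_top_suppliers_alt]
  rw [hguard, core]

-- ===== VERDICT (by name: the statement is the Claim_ definition above) =====
theorem select_top_suppliers_spec : Claim_equal_select_top_suppliers := by
  intro suppliers max_count _ _
  exact ports_eq suppliers max_count
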